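-- pv_equiv track=rewrite | github.com/JaewanHwang/algorithm-study | problems/pro_행렬과 연산/황재완_2c.py | solution
-- ===== SOURCE A (Python) =====
-- from collections import deque
--
-- def solution(rc, operations):
--     N, M = len(rc), len(rc[0])
--     left, right, middle = (deque() for _ in range(3))
--     for x in range(N):
--         left.append(rc[N - 1 - x][0])
--         right.append(rc[x][M - 1])
--         middle.append(deque(rc[x][1:M - 1]))
--     for op in operations:
--         if op == 'Rotate':
--             top, bottom = middle[0], middle[-1]
--             cur = left.pop()
--             top.appendleft(cur)
--             cur = top.pop()
--             right.appendleft(cur)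
--             cur = right.pop()
--             bottom.append(cur)
--             cur = bottom.popleft()
--             left.appendleft(cur)
--         else:
--             middle.rotate(1)
--             left.rotate(-1)
--             right.rotate(1)
--         ans = []
--     for x in range(N):
--         ans.append([left.pop()] + list(middle.popleft()) + [right.popleft()])
--     return ans
-- ===== SOURCE B (Python) =====
-- def solution(rc, operations):
--     M = len(rc[0])
--     grid = [row[:M] for row in rc]  # work on the M-column matrix (A only ever reads columns 0..M-1)
--     for op in operations:
--         N = len(grid)
--         if op == 'Rotate':
--             def val(i, j):
--                 if i == 0 and 0 < j:
--                     return grid[0][j - 1]          # top row moves right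
--                 if j == M - 1 and 0 < i:
--                     return grid[i - 1][M - 1]      # right column moves down
--                 if i == N - 1 and j < M - 1:
--                     return grid[N - 1][j + 1]      # bottom row moves left
--                 if j == 0 and i < N - 1:
--                     return grid[i + 1][0]          # left column moves up
--                 return grid[i][j]                  # interior unchanged
--             grid = [[val(i, j) for j in range(M)] for i in range(N)]
--         else:
--             # Shift: every column moves down cyclically by one row
--             grid = [[grid[i - 1][j] for j in range(M)] for i in range(N)]
--     return grid
-- ===== Notes on version B (the rewrite author's own statement) =====
-- stated objective: simpler
-- what changed: B drops A's three-deque (left/right/middle) state machine and works directly on a copy of the 2D matrix: each operation rebuilds the grid from a per-cell index formula ('Rotate' = clockwise one-step border rotation, 'Shift' = every column moves down one row cyclically via grid[i-1][j]); no deque encoding or final reassembly pass is needed.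
-- outside the precondition, e.g. on solution([[1], [2]], ['Rotate']): A returns [[2, 1], [2, 1]], B returns [[2], [1]]; on solution([[1, 2, 3]], ['Rotate']): A returns [[1, 3, 2]], B returns [[2, 1, 2]]
import Mathlib
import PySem

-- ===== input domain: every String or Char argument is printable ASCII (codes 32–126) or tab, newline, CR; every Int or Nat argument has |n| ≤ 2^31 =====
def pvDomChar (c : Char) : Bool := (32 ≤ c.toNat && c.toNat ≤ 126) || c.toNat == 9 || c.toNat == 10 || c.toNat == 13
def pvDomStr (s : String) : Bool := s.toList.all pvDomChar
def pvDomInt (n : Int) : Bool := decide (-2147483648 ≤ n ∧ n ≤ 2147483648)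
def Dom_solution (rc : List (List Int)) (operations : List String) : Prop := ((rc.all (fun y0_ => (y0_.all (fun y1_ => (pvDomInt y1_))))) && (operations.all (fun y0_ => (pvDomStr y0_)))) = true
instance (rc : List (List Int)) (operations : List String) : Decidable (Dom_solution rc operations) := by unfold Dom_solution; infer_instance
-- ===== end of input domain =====

-- B replaces A's three-deque border simulation by direct grid surgery (per-cell index
-- formula for the clockwise border rotation, last-row-to-front for Shift); same values,
-- no speed claim. Neither program mutates its arguments.

-- ===== PORT A =====
-- deque.rotate(1): last element to the front (no-op on the empty deque)
def pyRotR {α : Type} (l : List α) : List α :=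
  match l.getLast? with
  | none => l
  | some v => v :: l.dropLast

-- deque.rotate(-1): first element to the back
def pyRotL {α : Type} (l : List α) : List α :=
  match l with
  | [] => []
  | h :: t => t ++ [h]

-- one 'Rotate' step on A's (left, right, middle) state; Python's sequential in-place
-- deque mutations (including the middle[0] / middle[-1] aliasing when N = 1) are
-- reproduced by updating `middle` after each mutation of top/bottom.
def rotStepA (s : List Int × List Int × List (List Int)) : List Int × List Int × List (List Int) :=
  let left := s.1; let right := s.2.1; let middle := s.2.2
  let cur := left.getLastD 0            -- cur = left.pop()
  let left := left.dropLast
  let top := middle.headD []            -- top = middle[0]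
  let top := cur :: top                 -- top.appendleft(cur)
  let cur := top.getLastD 0             -- cur = top.pop()
  let top := top.dropLast
  let middle := middle.set 0 top
  let right := cur :: right             -- right.appendleft(cur)
  let cur := right.getLastD 0           -- cur = right.pop()
  let right := right.dropLast
  let bottom := middle.getLastD []      -- bottom = middle[-1] (sees top's update if N = 1)
  let bottom := bottom ++ [cur]         -- bottom.append(cur)
  let cur := bottom.headD 0             -- cur = bottom.popleft()
  let bottom := bottom.tail
  let middle := middle.set (middle.length - 1) bottom
  let left := cur :: left               -- left.appendleft(cur)
  (left, right, middle)

def solution (rc : List (List Int)) (operations : List String) : List (List Int) :=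
  let N : Int := rc.length
  let M : Int := (rc.headD []).length   -- len(rc[0]); Pre_ excludes rc = []
  let init := (PySem.List.pyRange 0 N 1).foldl
    (fun (s : List Int × List Int × List (List Int)) x =>
      (s.1 ++ [PySem.List.pyGetD (PySem.List.pyGetD rc (N - 1 - x) []) 0 0],
       s.2.1 ++ [PySem.List.pyGetD (PySem.List.pyGetD rc x []) (M - 1) 0],
       s.2.2 ++ [PySem.List.slice (PySem.List.pyGetD rc x []) (some 1) (some (M - 1))]))
    ([], [], [])
  let st := operations.foldl
    (fun s op =>
      if op = "Rotate" then rotStepA s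
      else (pyRotL s.1, pyRotR s.2.1, pyRotR s.2.2)) init
  let fin := (PySem.List.pyRange 0 N 1).foldl
    (fun (s : List Int × List (List Int) × List Int × List (List Int)) _x =>
      (s.1.dropLast, s.2.1.tail, s.2.2.1.tail,
       s.2.2.2 ++ [(s.1.getLastD 0 :: s.2.1.headD []) ++ [s.2.2.1.headD 0]]))
    (st.1, st.2.2, st.2.1, [])
  fin.2.2.2

-- ===== PORT B =====
-- value of cell (i, j) after one clockwise border rotation of `grid` (N rows, M columns)
def rotCell (grid : List (List Int)) (N M i j : Int) : Int :=
  if i = 0 ∧ 0 < j then PySem.List.pyGetD (PySem.List.pyGetD grid 0 []) (j - 1) 0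
  else if j = M - 1 ∧ 0 < i then PySem.List.pyGetD (PySem.List.pyGetD grid (i - 1) []) (M - 1) 0
  else if i = N - 1 ∧ j < M - 1 then PySem.List.pyGetD (PySem.List.pyGetD grid (N - 1) []) (j + 1) 0
  else if j = 0 ∧ i < N - 1 then PySem.List.pyGetD (PySem.List.pyGetD grid (i + 1) []) 0 0
  else PySem.List.pyGetD (PySem.List.pyGetD grid i []) j 0

def solution_alt (rc : List (List Int)) (operations : List String) : List (List Int) :=
  let M : Int := (rc.headD []).length
  let grid0 := rc.map (fun row => PySem.List.slice row none (some M))   -- row[:M]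
  operations.foldl
    (fun grid op =>
      let N : Int := grid.length
      if op = "Rotate" then
        (PySem.List.pyRange 0 N 1).map (fun i =>
          (PySem.List.pyRange 0 M 1).map (fun j => rotCell grid N M i j))
      else
        -- Shift: grid[i - 1][j] with Python's -1 wraparound on the first row
        (PySem.List.pyRange 0 N 1).map (fun i =>
          (PySem.List.pyRange 0 M 1).map (fun j =>
            PySem.List.pyGetD (PySem.List.pyGetD grid (i - 1) []) j 0)))
    grid0

-- ===== PRECONDITION & SPEC =====
-- Pre_ keeps the task's natural domain: a nonempty matrix with at least 2 columns, every
-- row at least as long as the first, at least one operation, and (for a single-row matrix)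
-- no 'Rotate'. Excluded inputs on which A still returns: single-column matrices (A
-- reassembles them into width-2 rows) and 'Rotate' on a single-row matrix (A's
-- middle[0]/middle[-1] aliasing makes the rotation act on an accidentally modified row);
-- both are degenerate corners outside the original problem's domain, where neither
-- behaviour is specified. A raises on empty matrices, rows shorter than the first, and an
-- empty operation list.
def Pre_solution (rc : List (List Int)) (operations : List String) : Prop :=
  1 ≤ rc.length ∧ 2 ≤ (rc.headD []).length ∧
  (∀ row ∈ rc, (rc.headD []).length ≤ row.length) ∧ operations ≠ [] ∧
  (2 ≤ rc.length ∨ "Rotate" ∉ operations)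
instance (rc : List (List Int)) (operations : List String) : Decidable (Pre_solution rc operations) := by
  unfold Pre_solution; infer_instance

def pvWitness_solution : List (List Int) × List String := ([[1, 2], [3, 4]], ["Rotate", "Shift"])

def Spec_solution (rc : List (List Int)) (operations : List String) (out : List (List Int)) : Prop :=
  out = solution_alt rc operations
instance (rc : List (List Int)) (operations : List String) (out : List (List Int)) :
    Decidable (Spec_solution rc operations out) := by unfold Spec_solution; infer_instance

-- ===== CLAIM (what is proved, stated in full; the proofs are below) =====
def Claim_equal_solution : Prop := ∀ (rc : List (List Int)) (operations : List String),
  Dom_solution rc operations → Pre_solution rc operations →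
  Spec_solution rc operations (solution rc operations)

-- ===== LEMMAS AND PROOFS =====

def colL (g : List (List Int)) : List Int := g.map (fun r => r.headD 0)
def colR (g : List (List Int)) : List Int := g.map (fun r => r.getLastD 0)
def midOf (g : List (List Int)) : List (List Int) := g.map (fun r => r.tail.dropLast)
def encS (g : List (List Int)) : List Int × List Int × List (List Int) :=
  ((colL g).reverse, colR g, midOf g)
def Rect (m : Nat) (g : List (List Int)) : Prop := ∀ r ∈ g, r.length = m
def rotBfun (g : List (List Int)) (m : Nat) : List (List Int) :=
  (PySem.List.pyRange 0 (g.length : Int) 1).map (fun i =>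
    (PySem.List.pyRange 0 (m : Int) 1).map (fun j => rotCell g (g.length : Int) (m : Int) i j))
def ent (g : List (List Int)) (i j : Nat) : Int := (g.getD i []).getD j 0
def zip3Rows : List Int → List (List Int) → List Int → List (List Int)
  | a :: as, b :: bs, c :: cs => (a :: b ++ [c]) :: zip3Rows as bs cs
  | _, _, _ => []

theorem map_pyRange_zero_eq {α : Type} (f : Int → α) (n : Nat) :
    (PySem.List.pyRange 0 (n : Int) 1).map f = (List.range n).map (fun (k : Nat) => f ((k : Nat) : Int)) := by
  rw [PySem.List.pyRange_one]
  simp only [List.map_map]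
  have : ((n:Int) - 0).toNat = n := by simp
  rw [this]
  apply List.map_congr_left
  intro k _
  simp

theorem length_pyRange_zero (n : Nat) : (PySem.List.pyRange 0 (n : Int) 1).length = n := by
  rw [PySem.List.length_pyRange_one]; simp

theorem foldl_triple {α : Type} (ks : List α) (f1 f2 : α → Int) (f3 : α → List Int)
    (l r : List Int) (m : List (List Int)) :
    ks.foldl (fun (s : List Int × List Int × List (List Int)) x =>
      (s.1 ++ [f1 x], s.2.1 ++ [f2 x], s.2.2 ++ [f3 x])) (l, r, m)
    = (l ++ ks.map f1, r ++ ks.map f2, m ++ ks.map f3) := by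
  induction ks generalizing l r m with
  | nil => simp
  | cons k ks ih => simp [List.foldl_cons, ih]

theorem map_pyRotR {α β : Type} (f : α → β) (l : List α) :
    (pyRotR l).map f = pyRotR (l.map f) := by
  cases l with
  | nil => simp [pyRotR]
  | cons a t =>
    simp only [pyRotR, List.getLast?_map]
    cases h : (a :: t).getLast? with
    | none => simp at h
    | some v => simp [List.map_dropLast]

theorem pyRotR_nonempty {α : Type} (l : List α) (h : l ≠ []) :
    pyRotR l = l.getLast h :: l.dropLast := by
  rw [pyRotR, List.getLast?_eq_some_getLast h]

theorem reverse_pyRotR {α : Type} (l : List α) :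
    (pyRotR l).reverse = pyRotL l.reverse := by
  rcases eq_or_ne l [] with rfl | hne
  · simp [pyRotR, pyRotL]
  · rw [pyRotR_nonempty l hne]
    have hrev : l.reverse = l.getLast hne :: l.dropLast.reverse := by
      conv_lhs => rw [← List.dropLast_append_getLast hne]
      simp
    rw [hrev]
    show (l.getLast hne :: l.dropLast).reverse = l.dropLast.reverse ++ [l.getLast hne]
    simp


theorem decode_fold {β : Type} (ks : List β) (lrev : List Int) (mid : List (List Int))
    (r : List Int) (acc : List (List Int))
    (h1 : lrev.length = ks.length) (h2 : mid.length = ks.length) (h3 : r.length = ks.length) :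
    ks.foldl (fun (s : List Int × List (List Int) × List Int × List (List Int)) _x =>
      (s.1.dropLast, s.2.1.tail, s.2.2.1.tail,
       s.2.2.2 ++ [(s.1.getLastD 0 :: s.2.1.headD []) ++ [s.2.2.1.headD 0]]))
    (lrev.reverse, mid, r, acc)
    = ([], [], [], acc ++ zip3Rows lrev mid r) := by
  induction ks generalizing lrev mid r acc with
  | nil =>
    simp only [List.length_nil, List.length_eq_zero_iff] at h1 h2 h3
    subst h1; subst h2; subst h3
    simp [zip3Rows]
  | cons k ks ih =>
    cases lrev with
    | nil => simp at h1
    | cons a as =>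
    cases mid with
    | nil => simp at h2
    | cons b bs =>
    cases r with
    | nil => simp at h3
    | cons c cs =>
    simp only [List.foldl_cons, List.reverse_cons, List.dropLast_concat, List.getLastD_concat,
      List.tail_cons, List.headD_cons]
    rw [ih as bs cs _ (by simpa using h1) (by simpa using h2) (by simpa using h3)]
    simp [zip3Rows]

theorem zip3Rows_enc (m : Nat) (hm : 2 ≤ m) (g : List (List Int)) (hr : Rect m g) :
    zip3Rows (colL g) (midOf g) (colR g) = g := by
  induction g with
  | nil => simp [colL, colR, midOf, zip3Rows]
  | cons r t ih =>
    have hrlen : r.length = m := hr r (by simp)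
    have ht : Rect m t := fun x hx => hr x (by simp [hx])
    cases r with
    | nil => simp at hrlen; omega
    | cons x t' =>
    have ht' : t' ≠ [] := by
      intro e; subst e; simp at hrlen; omega
    simp only [colL, colR, midOf, List.map_cons, zip3Rows, List.headD_cons, List.tail_cons]
    show (x :: (t'.dropLast ++ [(x :: t').getLastD 0])) :: zip3Rows (colL t) (midOf t) (colR t) = (x :: t') :: t
    rw [ih ht]
    have : (x :: t').getLastD 0 = t'.getLast ht' := by
      rw [List.getLastD_eq_getLast?, List.getLast?_eq_some_getLast (show x :: t' ≠ [] by simp),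
        Option.getD_some, List.getLast_cons ht']
    rw [this, List.dropLast_append_getLast ht']

def shiftBfun (g : List (List Int)) (m : Nat) : List (List Int) :=
  (PySem.List.pyRange 0 (g.length : Int) 1).map (fun i =>
    (PySem.List.pyRange 0 (m : Int) 1).map (fun j =>
      PySem.List.pyGetD (PySem.List.pyGetD g (i - 1) []) j 0))

theorem mem_pyRotR {α : Type} (l : List α) (x : α) : x ∈ pyRotR l ↔ x ∈ l := by
  cases l with
  | nil => simp [pyRotR]
  | cons a t =>
    have h : a :: t ≠ [] := by simp
    rw [pyRotR_nonempty _ h]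
    constructor
    · intro hx
      rcases List.mem_cons.mp hx with rfl | hx
      · exact List.getLast_mem h
      · exact List.mem_of_mem_dropLast hx
    · intro hx
      conv at hx => rw [← List.dropLast_append_getLast h]
      rcases List.mem_append.mp hx with hx' | hx'
      · exact List.mem_cons_of_mem _ hx'
      · exact List.mem_cons.mpr (Or.inl (List.mem_singleton.mp hx'))

theorem length_pyRotR {α : Type} (l : List α) : (pyRotR l).length = l.length := by
  cases l with
  | nil => rfl
  | cons a t =>
    rw [pyRotR_nonempty _ (by simp)]
    simp

theorem pyGetD_pyGetD_ent (g : List (List Int)) (i j : Nat) :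
    PySem.List.pyGetD (PySem.List.pyGetD g (i : Int) []) (j : Int) 0 = ent g i j := by
  simp [PySem.List.pyGetD_natCast, ent]

theorem rotBfun_eq (g : List (List Int)) (m : Nat) :
    rotBfun g m = (List.range g.length).map (fun (i : Nat) =>
      (List.range m).map (fun (j : Nat) => rotCell g (g.length : Int) (m : Int) (i : Int) (j : Int))) := by
  rw [rotBfun, map_pyRange_zero_eq]
  apply List.map_congr_left
  intro i _
  rw [map_pyRange_zero_eq]

theorem rotBfun_length (g : List (List Int)) (m : Nat) : (rotBfun g m).length = g.length := by
  rw [rotBfun_eq]; simp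

theorem rotBfun_getElem (g : List (List Int)) (m : Nat) (i : Nat) (hi : i < g.length) :
    (rotBfun g m)[i]'(by rw [rotBfun_length]; exact hi) =
      (List.range m).map (fun (j : Nat) => rotCell g (g.length : Int) (m : Int) (i : Int) (j : Int)) := by
  simp [rotBfun_eq]

theorem pyGetD0_ent (g : List (List Int)) (b : Nat) :
    PySem.List.pyGetD (PySem.List.pyGetD g 0 []) (b : Int) 0 = ent g 0 b := by
  rw [PySem.List.pyGetD_zero, PySem.List.pyGetD_natCast]
  simp [ent]

theorem pyGetD0'_ent (g : List (List Int)) (a : Nat) :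
    PySem.List.pyGetD (PySem.List.pyGetD g (a : Int) []) 0 0 = ent g a 0 := by
  rw [PySem.List.pyGetD_natCast, PySem.List.pyGetD_zero]
  simp [ent]

theorem rotCell_nat (g : List (List Int)) (m : Nat) (i j : Nat) (hm : 2 ≤ m)
    (hi : i < g.length) (hj : j < m) :
    rotCell g (g.length : Int) (m : Int) (i : Int) (j : Int) =
      (if i = 0 ∧ 0 < j then ent g 0 (j - 1)
       else if j = m - 1 ∧ 0 < i then ent g (i - 1) (m - 1)
       else if i = g.length - 1 ∧ j < m - 1 then ent g (g.length - 1) (j + 1)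
       else if j = 0 ∧ i < g.length - 1 then ent g (i + 1) 0
       else ent g i j) := by
  rw [rotCell]
  have e1 : ((i : Int) = 0 ∧ 0 < (j : Int)) ↔ (i = 0 ∧ 0 < j) := by omega
  have e2 : ((j : Int) = (m : Int) - 1 ∧ 0 < (i : Int)) ↔ (j = m - 1 ∧ 0 < i) := by omega
  have e3 : ((i : Int) = (g.length : Int) - 1 ∧ (j : Int) < (m : Int) - 1) ↔
      (i = g.length - 1 ∧ j < m - 1) := by omega
  have e4 : ((j : Int) = 0 ∧ (i : Int) < (g.length : Int) - 1) ↔ (j = 0 ∧ i < g.length - 1) := by omega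
  rw [if_congr e1 rfl rfl, if_congr e2 rfl rfl, if_congr e3 rfl rfl, if_congr e4 rfl rfl]
  split_ifs with h1 h2 h3 h4
  · have hc : ((j : Int) - 1) = ((j - 1 : Nat) : Int) := by omega
    rw [hc, pyGetD0_ent]
  · have hc : ((m : Int) - 1) = ((m - 1 : Nat) : Int) := by omega
    have hc2 : ((i : Int) - 1) = ((i - 1 : Nat) : Int) := by omega
    rw [hc, hc2, pyGetD_pyGetD_ent]
  · have hc : ((g.length : Int) - 1) = ((g.length - 1 : Nat) : Int) := by omega
    have hc2 : ((j : Int) + 1) = ((j + 1 : Nat) : Int) := by omega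
    rw [hc, hc2, pyGetD_pyGetD_ent]
  · have hc : ((i : Int) + 1) = ((i + 1 : Nat) : Int) := by omega
    rw [hc, pyGetD0'_ent]
  · rw [pyGetD_pyGetD_ent]

theorem list_eq_map_range {α : Type} (l : List α) (k : Nat) (f : Nat → α)
    (hl : l.length = k) (h : ∀ j (hj : j < k), l[j]'(by omega) = f j) :
    l = (List.range k).map f := by
  apply List.ext_getElem
  · simpa using hl
  · intro i h1 h2
    simp only [List.getElem_map, List.getElem_range]
    exact h i (by simpa using h2)

theorem headD_eq_getD (r : List Int) : r.headD 0 = r.getD 0 0 := by cases r <;> simp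
theorem headD_eq_getD' (r : List (List Int)) : r.headD [] = r.getD 0 [] := by cases r <;> simp

theorem getLastD_eq_getD (r : List Int) (m : Nat) (hlen : r.length = m) (hm : 1 ≤ m) :
    r.getLastD 0 = r.getD (m - 1) 0 := by
  have hne : r ≠ [] := by intro e; subst e; simp at hlen; omega
  rw [List.getLastD_eq_getLast?, List.getLast?_eq_some_getLast hne, Option.getD_some,
    List.getLast_eq_getElem, List.getD_eq_getElem _ _ (by omega)]
  congr 1; omega

theorem getLastD_irrel {α : Type} (l : List α) (d d' : α) (h : l ≠ []) :
    l.getLastD d = l.getLastD d' := by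
  rw [List.getLastD_eq_getLast?, List.getLastD_eq_getLast?, List.getLast?_eq_some_getLast h]
  rfl

theorem rowAt_length (m : Nat) (g : List (List Int)) (hr : Rect m g) (i : Nat) (hi : i < g.length) :
    (g.getD i []).length = m := by
  rw [List.getD_eq_getElem _ _ hi]
  exact hr _ (List.getElem_mem hi)

theorem colL_getElem (g : List (List Int)) (i : Nat) (hi : i < g.length) :
    (colL g)[i]'(by simp [colL]; omega) = ent g i 0 := by
  simp only [colL, List.getElem_map]
  rw [headD_eq_getD, ent, List.getD_eq_getElem _ _ hi]

theorem colR_getElem (m : Nat) (g : List (List Int)) (hr : Rect m g) (hm : 1 ≤ m)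
    (i : Nat) (hi : i < g.length) :
    (colR g)[i]'(by simp [colR]; omega) = ent g i (m - 1) := by
  simp only [colR, List.getElem_map]
  rw [getLastD_eq_getD _ m (hr _ (List.getElem_mem hi)) hm, ent, List.getD_eq_getElem _ _ hi]

theorem midOf_getElem (g : List (List Int)) (i : Nat) (hi : i < g.length) :
    (midOf g)[i]'(by simp [midOf]; omega) = (g.getD i []).tail.dropLast := by
  simp only [midOf, List.getElem_map]
  rw [List.getD_eq_getElem _ _ hi]

theorem tail_dropLast_length (r : List Int) (m : Nat) (h : r.length = m) :
    r.tail.dropLast.length = m - 2 := by simp; omega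

theorem tail_dropLast_getElem (r : List Int) (m : Nat) (h : r.length = m) (j : Nat)
    (hj : j < m - 2) :
    r.tail.dropLast[j]'(by rw [tail_dropLast_length r m h]; exact hj) = r.getD (j + 1) 0 := by
  rw [List.getElem_dropLast, List.getElem_tail, List.getD_eq_getElem _ _ (by omega)]

theorem getLastD_reverse {α : Type} (l : List α) (d : α) : l.reverse.getLastD d = l.headD d := by
  cases l with
  | nil => rfl
  | cons a t => simp

theorem dropLast_reverse {α : Type} (l : List α) : l.reverse.dropLast = l.tail.reverse := by
  cases l with
  | nil => rfl
  | cons a t => simp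

theorem getLastD_eq_getD' (l : List (List Int)) (k : Nat) (hlen : l.length = k) (hk : 1 ≤ k) :
    l.getLastD [] = l.getD (k - 1) [] := by
  have hne : l ≠ [] := by intro e; subst e; simp at hlen; omega
  rw [List.getLastD_eq_getLast?, List.getLast?_eq_some_getLast hne, Option.getD_some,
    List.getLast_eq_getElem, List.getD_eq_getElem _ _ (by omega)]
  congr 1; omega

theorem dropLast_cons_ne {α : Type} (a : α) (l : List α) (h : l ≠ []) :
    (a :: l).dropLast = a :: l.dropLast := by
  cases l with
  | nil => exact absurd rfl h
  | cons b t => rfl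

theorem tail_dropLast_getElem_g {α : Type} (l : List α) (j : Nat) (hj : j < l.length - 2) :
    l.tail.dropLast[j]'(by simp; omega) = l[j + 1]'(by omega) := by
  rw [List.getElem_dropLast, List.getElem_tail]

theorem map_range_tail_dropLast {α : Type} (f : Nat → α) (m : Nat) :
    ((List.range m).map f).tail.dropLast = (List.range (m - 2)).map (fun j => f (j + 1)) := by
  apply list_eq_map_range _ _ _ (by simp; omega)
  intro j hj
  have h2 : j < ((List.range m).map f).length - 2 := by simp; omega
  rw [tail_dropLast_getElem_g _ _ h2]
  simp

theorem getD_map_range {α : Type} [Inhabited α] (f : Nat → α) (d : α) (m j : Nat) (hj : j < m) :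
    ((List.range m).map f).getD j d = f j := by
  rw [List.getD_eq_getElem _ _ (by simp; omega)]
  simp

theorem aux_cur2 (row : List Int) (m : Nat) (hlen : row.length = m) (hm : 2 ≤ m) :
    (row.getD 0 0 :: row.tail.dropLast).getLastD 0 = row.getD (m - 2) 0 := by
  by_cases hm2 : m = 2
  · have : row.tail.dropLast.length = 0 := by simp; omega
    rw [List.length_eq_zero_iff] at this
    rw [this]
    subst hm2; rfl
  · have hne : row.tail.dropLast ≠ [] := by
      intro e
      have := congrArg List.length e
      simp at this; omega
    rw [List.getLastD_cons, getLastD_irrel _ _ 0 hne,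
      getLastD_eq_getD _ (m - 2) (by simp; omega) (by omega),
      List.getD_eq_getElem _ _ (by rw [tail_dropLast_length row m hlen]; omega),
      tail_dropLast_getElem row m hlen (m - 2 - 1) (by omega)]
    congr 1; omega

theorem aux_cur4 (row : List Int) (m : Nat) (hlen : row.length = m) (hm : 2 ≤ m) (c : Int) :
    (row.tail.dropLast ++ [c]).headD 0 = (if m = 2 then c else row.getD 1 0) := by
  by_cases hm2 : m = 2
  · have : row.tail.dropLast.length = 0 := by simp; omega
    rw [List.length_eq_zero_iff] at this
    rw [this, if_pos hm2]; rfl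
  · rw [if_neg hm2]
    have hgd : row.tail.dropLast.getD 0 0 = row.getD 1 0 := by
      rw [List.getD_eq_getElem _ _ (by rw [tail_dropLast_length row m hlen]; omega),
        tail_dropLast_getElem row m hlen 0 (by omega)]
    cases ht : row.tail.dropLast with
    | nil =>
      have := congrArg List.length ht
      simp [tail_dropLast_length row m hlen] at this; omega
    | cons a t =>
      simp only [List.cons_append, List.headD_cons]
      rw [← hgd, ht]
      rfl


theorem rect_rotB (m : Nat) (g : List (List Int)) : Rect m (rotBfun g m) := by
  intro r hrB
  rw [rotBfun_eq] at hrB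
  simp only [List.mem_map, List.mem_range] at hrB
  obtain ⟨i, ⟨hi, rfl⟩⟩ := hrB
  simp

theorem rotB_getD (g : List (List Int)) (m : Nat) (i : Nat) (hi : i < g.length) :
    (rotBfun g m).getD i [] =
      (List.range m).map (fun (j : Nat) => rotCell g (g.length : Int) (m : Int) (i : Int) (j : Int)) := by
  rw [List.getD_eq_getElem _ _ (by rw [rotBfun_length]; exact hi), rotBfun_getElem g m i hi]

theorem rotStepA_enc (m : Nat) (hm : 2 ≤ m) (g : List (List Int)) (hn : 2 ≤ g.length)
    (hr : Rect m g) : rotStepA (encS g) = encS (rotBfun g m) := by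
  have hcolLlen : (colL g).length = g.length := by simp [colL]
  have hcolRlen : (colR g).length = g.length := by simp [colR]
  have hmidlen : (midOf g).length = g.length := by simp [midOf]
  have hcolRne : colR g ≠ [] := by
    intro e
    have h0 := hcolRlen
    rw [e] at h0
    simp at h0
    omega
  have hrow0len : (g.getD 0 []).length = m := rowAt_length m g hr 0 (by omega)
  have hrowllen : (g.getD (g.length - 1) []).length = m := rowAt_length m g hr _ (by omega)
  have h1 : (colL g).reverse.getLastD 0 = ent g 0 0 := by
    rw [getLastD_reverse, headD_eq_getD,
      List.getD_eq_getElem _ _ (show 0 < (colL g).length by omega), colL_getElem g 0 (by omega)]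
  have h2 : (midOf g).headD [] = (g.getD 0 []).tail.dropLast := by
    rw [headD_eq_getD', List.getD_eq_getElem _ _ (show 0 < (midOf g).length by omega),
      midOf_getElem g 0 (by omega)]
  have h3 : (ent g 0 0 :: (g.getD 0 []).tail.dropLast).getLastD 0 = ent g 0 (m - 2) := by
    rw [show ent g 0 0 = (g.getD 0 []).getD 0 0 from rfl, aux_cur2 _ m hrow0len hm]
    rfl
  have h4 : (ent g 0 (m - 2) :: colR g).getLastD 0 = ent g (g.length - 1) (m - 1) := by
    rw [List.getLastD_cons, getLastD_irrel _ _ 0 hcolRne,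
      getLastD_eq_getD _ g.length hcolRlen (by omega),
      List.getD_eq_getElem _ _ (by omega), colR_getElem m g hr (by omega) _ (by omega)]
  have h5 : (ent g 0 (m - 2) :: colR g).dropLast = ent g 0 (m - 2) :: (colR g).dropLast :=
    dropLast_cons_ne _ _ hcolRne
  have h6 : ∀ T : List Int, ((midOf g).set 0 T).getLastD [] = (g.getD (g.length - 1) []).tail.dropLast := by
    intro T
    rw [getLastD_eq_getD' _ g.length (by simp [hmidlen]) (by omega),
      List.getD_eq_getElem _ _ (by rw [List.length_set, hmidlen]; omega)]

    rw [List.getElem_set]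
    rw [if_neg (by omega)]
    exact midOf_getElem g _ (by omega)
  have h7 : ((g.getD (g.length - 1) []).tail.dropLast ++ [ent g (g.length - 1) (m - 1)]).headD 0
      = ent g (g.length - 1) 1 := by
    rw [aux_cur4 _ m hrowllen hm]
    by_cases hm2 : m = 2
    · rw [if_pos hm2, hm2]
    · rw [if_neg hm2]; rfl
  have h8 : ∀ T : List Int, ((midOf g).set 0 T).length - 1 = g.length - 1 := by
    intro T; simp [hmidlen]
  simp only [rotStepA, encS]
  rw [h1, h2, h3, h4, h5, h6 _, h7, h8 _, dropLast_reverse]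
  simp only [Prod.mk.injEq]
  refine ⟨?_, ?_, ?_⟩
  · -- C1 : left column
    have e1 : ent g (g.length - 1) 1 :: (colL g).tail.reverse =
        (List.range g.length).map (fun i => if i = 0 then ent g (g.length - 1) 1
          else ent g (g.length - i) 0) := by
      apply list_eq_map_range _ _ _ (by simp [colL]; omega)
      intro j hj
      cases j with
      | zero => simp
      | succ k =>
        rw [List.getElem_cons_succ, if_neg (by omega)]
        rw [List.getElem_reverse, List.getElem_tail,
          colL_getElem g _ (by simp [colL] at *; omega)]
        congr 1
        simp [colL] at *
        omega
    have e2 : (colL (rotBfun g m)).reverse =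
        (List.range g.length).map (fun i => if i = 0 then ent g (g.length - 1) 1
          else ent g (g.length - i) 0) := by
      apply list_eq_map_range _ _ _ (by simp [colL, rotBfun_length])
      intro j hj
      rw [List.getElem_reverse, colL_getElem (rotBfun g m) _
        (by rw [rotBfun_length]; simp [colL, rotBfun_length] at *; omega)]
      rw [show ent (rotBfun g m) ((colL (rotBfun g m)).length - 1 - j) 0 =
        ((rotBfun g m).getD ((colL (rotBfun g m)).length - 1 - j) []).getD 0 0 from rfl]
      have hlen' : (colL (rotBfun g m)).length = g.length := by simp [colL, rotBfun_length]
      rw [hlen']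
      rw [rotB_getD g m _ (by omega), getD_map_range _ _ m 0 (by omega),
        rotCell_nat g m _ 0 hm (by omega) (by omega)]
      by_cases hj0 : j = 0
      · subst hj0
        rw [if_neg (by omega), if_neg (by omega), if_pos (by omega), if_pos (by constructor <;> omega)]
      · rw [if_neg (by omega), if_neg (by omega), if_neg (by omega), if_pos (by constructor <;> omega),
          if_neg hj0]
        congr 1
        omega
    rw [e1, e2]
  · -- C2 : right column
    have e1 : ent g 0 (m - 2) :: (colR g).dropLast =
        (List.range g.length).map (fun i => if i = 0 then ent g 0 (m - 2)
          else ent g (i - 1) (m - 1)) := by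
      apply list_eq_map_range _ _ _ (by simp [colR]; omega)
      intro j hj
      cases j with
      | zero => simp
      | succ k =>
        rw [List.getElem_cons_succ, if_neg (by omega), List.getElem_dropLast,
          colR_getElem m g hr (by omega) _ (by simp [colR] at *; omega)]
        congr 1
        all_goals omega
    have e2 : colR (rotBfun g m) =
        (List.range g.length).map (fun i => if i = 0 then ent g 0 (m - 2)
          else ent g (i - 1) (m - 1)) := by
      apply list_eq_map_range _ _ _ (by simp [colR, rotBfun_length])
      intro j hj
      rw [colR_getElem m (rotBfun g m) (rect_rotB m g) (by omega) _ (by rw [rotBfun_length]; simp [colR, rotBfun_length] at *; omega)]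
      rw [show ent (rotBfun g m) j (m - 1) = ((rotBfun g m).getD j []).getD (m - 1) 0 from rfl]
      have hj' : j < g.length := by simp [colR, rotBfun_length] at hj; omega
      rw [rotB_getD g m _ hj', getD_map_range _ _ m (m - 1) (by omega),
        rotCell_nat g m _ (m - 1) hm (by omega) (by omega)]
      by_cases hj0 : j = 0
      · subst hj0
        rw [if_pos (by constructor <;> omega), if_pos (by omega)]
        congr 1
        all_goals omega
      · rw [if_neg (by omega), if_pos (by constructor <;> omega), if_neg hj0]
    rw [e1, e2]
  · -- C3 : middle block
    have hmid1len : ∀ T : List Int, ((midOf g).set 0 T).length = g.length := by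
      intro T; simp [hmidlen]
    apply Eq.trans (b := (List.range g.length).map (fun i =>
        if i = 0 then (List.range (m - 2)).map (fun j => ent g 0 j)
        else if i = g.length - 1 then (List.range (m - 2)).map (fun j => ent g (g.length - 1) (j + 2))
        else (List.range (m - 2)).map (fun j => ent g i (j + 1))))
    · apply list_eq_map_range _ _ _ (by simp [hmidlen])
      intro i hi
      have hi' : i < g.length := by simp [hmidlen] at hi; omega
      rw [List.getElem_set, List.getElem_set]
      by_cases hil : i = g.length - 1
      · rw [if_pos (by omega), if_neg (by omega), if_pos hil]
        apply list_eq_map_range _ _ _ (by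
          rw [List.length_tail, List.length_append, tail_dropLast_length _ m hrowllen]
          simp only [List.length_cons, List.length_nil]
          omega)
        intro j hj
        rw [List.getElem_tail]
        by_cases hjl : j + 1 < (g.getD (g.length - 1) []).tail.dropLast.length
        · rw [List.getElem_append_left hjl]
          rw [tail_dropLast_getElem (g.getD (g.length - 1) []) m hrowllen (j + 1)
            (by rw [tail_dropLast_length _ m hrowllen] at hjl; omega)]
          rfl
        · rw [List.getElem_append_right (by omega)]
          have h0idx : j + 1 - (g.getD (g.length - 1) []).tail.dropLast.length = 0 := by
            rw [tail_dropLast_length _ m hrowllen]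
            rw [tail_dropLast_length _ m hrowllen] at hjl
            omega
          simp only [h0idx, List.getElem_cons_zero]
          congr 1
          rw [tail_dropLast_length _ m hrowllen] at hjl
          omega
      · rw [if_neg (by omega)]
        by_cases hi0 : i = 0
        · rw [if_pos (by omega), if_pos hi0]
          apply list_eq_map_range _ _ _ (by
            rw [List.length_dropLast, List.length_cons, tail_dropLast_length _ m hrow0len]
            omega)
          intro j hj
          rw [List.getElem_dropLast]
          cases j with
          | zero =>
            rw [List.getElem_cons_zero]
          | succ k =>
            rw [List.getElem_cons_succ]
            rw [tail_dropLast_getElem (g.getD 0 []) m hrow0len k (by omega)]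
            rfl
        · rw [if_neg (by omega), if_neg hi0, if_neg hil, midOf_getElem g i hi']
          have hrowilen : (g.getD i []).length = m := rowAt_length m g hr i hi'
          apply list_eq_map_range _ _ _ (tail_dropLast_length _ m hrowilen)
          intro j hj
          rw [tail_dropLast_getElem (g.getD i []) m hrowilen j hj]
          rfl
    · symm
      apply list_eq_map_range _ _ _ (by simp [midOf, rotBfun_length])
      intro i hi
      have hi' : i < g.length := by simp [midOf, rotBfun_length] at hi; omega
      rw [midOf_getElem (rotBfun g m) i (by rw [rotBfun_length]; exact hi'),
        rotB_getD g m i hi', map_range_tail_dropLast]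
      by_cases hi0 : i = 0
      · rw [if_pos hi0]
        apply List.map_congr_left
        intro j hjmem
        have hj : j < m - 2 := List.mem_range.mp hjmem
        rw [rotCell_nat g m i (j + 1) hm hi' (by omega)]
        rw [if_pos (by constructor <;> omega)]
        subst hi0
        congr 1
        all_goals omega
      · by_cases hil : i = g.length - 1
        · rw [if_neg hi0, if_pos hil]
          apply List.map_congr_left
          intro j hjmem
          have hj : j < m - 2 := List.mem_range.mp hjmem
          rw [rotCell_nat g m i (j + 1) hm hi' (by omega)]
          rw [if_neg (by intro hc; exact hi0 hc.1), if_neg (by intro hc; omega),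
            if_pos (by constructor <;> omega)]
        · rw [if_neg hi0, if_neg hil]
          apply List.map_congr_left
          intro j hjmem
          have hj : j < m - 2 := List.mem_range.mp hjmem
          rw [rotCell_nat g m i (j + 1) hm hi' (by omega)]
          rw [if_neg (by intro hc; exact hi0 hc.1), if_neg (by intro hc; omega),
            if_neg (by intro hc; exact hil hc.1), if_neg (by intro hc; omega)]

theorem colL_pyRotR (g : List (List Int)) : colL (pyRotR g) = pyRotR (colL g) :=
  map_pyRotR _ g
theorem colR_pyRotR (g : List (List Int)) : colR (pyRotR g) = pyRotR (colR g) :=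
  map_pyRotR _ g
theorem midOf_pyRotR (g : List (List Int)) : midOf (pyRotR g) = pyRotR (midOf g) :=
  map_pyRotR _ g

theorem shift_enc (g : List (List Int)) :
    (pyRotL (colL g).reverse, pyRotR (colR g), pyRotR (midOf g)) = encS (pyRotR g) := by
  simp only [encS, Prod.mk.injEq]
  refine ⟨?_, ?_, ?_⟩
  · rw [colL_pyRotR, reverse_pyRotR]
  · rw [colR_pyRotR]
  · rw [midOf_pyRotR]

theorem rect_pyRotR (m : Nat) (g : List (List Int)) (hr : Rect m g) : Rect m (pyRotR g) := by
  intro r hrm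
  exact hr r ((mem_pyRotR g r).mp hrm)

theorem row_reconstruct (r : List Int) (m : Nat) (hlen : r.length = m) :
    (List.range m).map (fun j => r.getD j 0) = r := by
  symm
  apply list_eq_map_range _ _ _ hlen
  intro j hj
  rw [List.getD_eq_getElem _ _ (by omega)]

theorem shiftBfun_eq (m : Nat) (g : List (List Int)) (hg : g ≠ []) (hr : Rect m g) :
    shiftBfun g m = pyRotR g := by
  rw [shiftBfun, map_pyRange_zero_eq]
  symm
  apply list_eq_map_range _ _ _ (by rw [length_pyRotR])
  intro i hi
  rw [map_pyRange_zero_eq]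
  have hi' : i < g.length := hi
  cases i with
  | zero =>
    simp only [pyRotR_nonempty g hg, List.getElem_cons_zero]
    rw [show ((0 : Nat) : Int) - 1 = (-1 : Int) by norm_num,
      PySem.List.pyGetD_neg_one _ [] hg]
    symm
    have hmem : g.getLast hg ∈ g := List.getLast_mem hg
    refine Eq.trans ?_ (row_reconstruct (g.getLast hg) m (hr _ hmem))
    apply List.map_congr_left
    intro j _
    rw [PySem.List.pyGetD_natCast]
  | succ k =>
    simp only [pyRotR_nonempty g hg, List.getElem_cons_succ, List.getElem_dropLast]
    rw [show ((k + 1 : Nat) : Int) - 1 = ((k : Nat) : Int) by push_cast; ring]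
    symm
    have hklen : (g.getD k []).length = m := rowAt_length m g hr k (by omega)
    refine Eq.trans ?_ ((row_reconstruct (g.getD k []) m hklen).trans ?_)
    · apply List.map_congr_left
      intro j _
      rw [PySem.List.pyGetD_natCast, PySem.List.pyGetD_natCast]
    · rw [List.getD_eq_getElem _ _ (by omega)]

theorem fold_enc (m : Nat) (hm : 2 ≤ m) (ops : List String) :
    ∀ g : List (List Int), 1 ≤ g.length → (2 ≤ g.length ∨ "Rotate" ∉ ops) → Rect m g →
      (ops.foldl (fun s op => if op = "Rotate" then rotStepA s
          else (pyRotL s.1, pyRotR s.2.1, pyRotR s.2.2)) (encS g)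
        = encS (ops.foldl (fun grid op => if op = "Rotate" then rotBfun grid m
            else shiftBfun grid m) g))
      ∧ (ops.foldl (fun grid op => if op = "Rotate" then rotBfun grid m
            else shiftBfun grid m) g).length = g.length
      ∧ Rect m (ops.foldl (fun grid op => if op = "Rotate" then rotBfun grid m
            else shiftBfun grid m) g) := by
  induction ops with
  | nil => exact fun g hg hcase hr => ⟨rfl, rfl, hr⟩
  | cons op ops ih =>
    intro g hg hcase hr
    have hgne : g ≠ [] := by intro e; subst e; simp at hg
    by_cases hop : op = "Rotate"
    · have hg2 : 2 ≤ g.length := by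
        rcases hcase with h | h
        · exact h
        · exfalso
          apply h
          rw [← hop]
          exact List.mem_cons_self
      obtain ⟨e1, e2, e3⟩ := ih (rotBfun g m) (by rw [rotBfun_length]; omega)
        (Or.inl (by rw [rotBfun_length]; omega)) (rect_rotB m g)
      simp only [List.foldl_cons, if_pos hop]
      refine ⟨?_, ?_, e3⟩
      · rw [rotStepA_enc m hm g hg2 hr]
        exact e1
      · rw [e2, rotBfun_length]
    · have hcase' : 2 ≤ (pyRotR g).length ∨ "Rotate" ∉ ops := by
        rcases hcase with h | h
        · exact Or.inl (by rw [length_pyRotR]; omega)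
        · exact Or.inr (fun hmem => h (List.mem_cons_of_mem _ hmem))
      obtain ⟨e1, e2, e3⟩ := ih (pyRotR g) (by rw [length_pyRotR]; omega) hcase' (rect_pyRotR m g hr)
      simp only [List.foldl_cons, if_neg hop, encS]
      rw [shiftBfun_eq m g hgne hr]
      rw [show (pyRotL (colL g).reverse, pyRotR (colR g), pyRotR (midOf g)) = encS (pyRotR g) from shift_enc g]
      refine ⟨e1, ?_, e3⟩
      rw [e2, length_pyRotR]

theorem getD_take (row : List Int) (mm j : Nat) (hj : j < mm) :
    (row.take mm).getD j 0 = row.getD j 0 := by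
  by_cases hlt : j < row.length
  · rw [List.getD_eq_getElem _ _ (by simp; omega), List.getD_eq_getElem _ _ hlt,
      List.getElem_take]
  · rw [List.getD_eq_default _ _ (by simp; omega), List.getD_eq_default _ _ (by omega)]

theorem slice_take (row : List Int) (k : Nat) :
    PySem.List.slice row none (some (k : Int)) = row.take k :=
  PySem.List.slice_to_natCast row k

theorem init_enc (rc : List (List Int)) (m : Nat) (hm : 2 ≤ m)
    (hrows : ∀ row ∈ rc, m ≤ row.length) (hn : 1 ≤ rc.length) :
    (PySem.List.pyRange 0 (rc.length : Int) 1).foldl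
      (fun (s : List Int × List Int × List (List Int)) x =>
        (s.1 ++ [PySem.List.pyGetD (PySem.List.pyGetD rc ((rc.length : Int) - 1 - x) []) 0 0],
         s.2.1 ++ [PySem.List.pyGetD (PySem.List.pyGetD rc x []) ((m : Int) - 1) 0],
         s.2.2 ++ [PySem.List.slice (PySem.List.pyGetD rc x []) (some 1) (some ((m : Int) - 1))]))
      ([], [], [])
    = encS (rc.map (fun row => PySem.List.slice row none (some (m : Int)))) := by
  have hg0get : ∀ i, i < rc.length →
      (rc.map (fun row => PySem.List.slice row none (some (m : Int)))).getD i []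
        = (rc.getD i []).take m := by
    intro i hi
    rw [List.getD_eq_getElem _ _ (by simp; omega), List.getElem_map, slice_take,
      List.getD_eq_getElem _ _ hi]
  have hg0len : (rc.map (fun row => PySem.List.slice row none (some (m : Int)))).length = rc.length := by
    simp
  have hrowlen : ∀ i, i < rc.length → m ≤ (rc.getD i []).length := by
    intro i hi
    rw [List.getD_eq_getElem _ _ hi]
    exact hrows _ (List.getElem_mem hi)
  have entg0 : ∀ i j', i < rc.length → j' < m →
      ent (rc.map (fun row => PySem.List.slice row none (some (m : Int)))) i j' = ent rc i j' := by
    intro i j' hi hj'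
    show ((rc.map (fun row => PySem.List.slice row none (some (m : Int)))).getD i []).getD j' 0
      = (rc.getD i []).getD j' 0
    rw [hg0get i hi, getD_take _ m j' hj']
  have hrect0 : Rect m (rc.map (fun row => PySem.List.slice row none (some (m : Int)))) := by
    intro r hrm
    simp only [List.mem_map] at hrm
    obtain ⟨row, hrow, rfl⟩ := hrm
    rw [slice_take, List.length_take, Nat.min_eq_left (hrows row hrow)]
  rw [foldl_triple, map_pyRange_zero_eq, map_pyRange_zero_eq, map_pyRange_zero_eq]
  simp only [List.nil_append, encS, Prod.mk.injEq]
  refine ⟨?_, ?_, ?_⟩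
  · have a1 : (List.range rc.length).map
        (fun (k : Nat) => PySem.List.pyGetD (PySem.List.pyGetD rc ((rc.length : Int) - 1 - (k : Int)) []) 0 0)
        = (List.range rc.length).map (fun j => ent rc (rc.length - 1 - j) 0) := by
      apply List.map_congr_left
      intro j hjmem
      have hj : j < rc.length := List.mem_range.mp hjmem
      rw [show ((rc.length : Int) - 1 - (j : Int)) = ((rc.length - 1 - j : Nat) : Int) by omega,
        pyGetD0'_ent]
    have a2 : (colL (rc.map (fun row => PySem.List.slice row none (some (m : Int))))).reverse
        = (List.range rc.length).map (fun j => ent rc (rc.length - 1 - j) 0) := by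
      apply list_eq_map_range _ _ _ (by simp [colL])
      intro j hj
      have hclen : (colL (rc.map (fun row => PySem.List.slice row none (some (m : Int))))).length
          = rc.length := by simp [colL]
      rw [List.getElem_reverse]
      simp only [hclen]
      rw [colL_getElem _ _ (by rw [hg0len]; omega)]
      exact entg0 _ 0 (by omega) (by omega)
    exact a1.trans a2.symm
  · have a1 : (List.range rc.length).map
        (fun (k : Nat) => PySem.List.pyGetD (PySem.List.pyGetD rc (k : Int) []) ((m : Int) - 1) 0)
        = (List.range rc.length).map (fun j => ent rc j (m - 1)) := by
      apply List.map_congr_left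
      intro j hjmem
      rw [show ((m : Int) - 1) = ((m - 1 : Nat) : Int) by omega, pyGetD_pyGetD_ent]
    have a2 : colR (rc.map (fun row => PySem.List.slice row none (some (m : Int))))
        = (List.range rc.length).map (fun j => ent rc j (m - 1)) := by
      apply list_eq_map_range _ _ _ (by simp [colR])
      intro j hj
      have hj' : j < rc.length := by simp [colR] at hj; omega
      rw [colR_getElem m _ hrect0 (by omega) _ (by rw [hg0len]; omega)]
      exact entg0 _ (m - 1) hj' (by omega)
    exact a1.trans a2.symm
  · have a1 : (List.range rc.length).map
        (fun (k : Nat) => PySem.List.slice (PySem.List.pyGetD rc (k : Int) []) (some 1) (some ((m : Int) - 1)))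
        = (List.range rc.length).map (fun j => ((rc.getD j []).drop 1).take (m - 1 - 1)) := by
      apply List.map_congr_left
      intro j hjmem
      rw [PySem.List.pyGetD_natCast, show ((m : Int) - 1) = ((m - 1 : Nat) : Int) by omega,
        show (some (1 : Int)) = (some ((1 : Nat) : Int)) from rfl, PySem.List.slice_natCast]
    have a2 : midOf (rc.map (fun row => PySem.List.slice row none (some (m : Int))))
        = (List.range rc.length).map (fun j => ((rc.getD j []).drop 1).take (m - 1 - 1)) := by
      apply list_eq_map_range _ _ _ (by simp [midOf])
      intro j hj
      have hj' : j < rc.length := by simp [midOf] at hj; omega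
      rw [midOf_getElem _ _ (by rw [hg0len]; omega), hg0get j hj']
      have hlen : ((rc.getD j []).take m).length = m := by
        rw [List.length_take, Nat.min_eq_left (hrowlen j hj')]
      have i1 : ((rc.getD j []).take m).tail.dropLast
          = (List.range (m - 2)).map (fun k => (rc.getD j []).getD (k + 1) 0) := by
        apply list_eq_map_range _ _ _ (tail_dropLast_length _ m hlen)
        intro k hk
        rw [tail_dropLast_getElem _ m hlen k hk, getD_take _ m (k + 1) (by omega)]
      have i2 : ((rc.getD j []).drop 1).take (m - 1 - 1)
          = (List.range (m - 2)).map (fun k => (rc.getD j []).getD (k + 1) 0) := by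
        apply list_eq_map_range _ _ _ (by
          rw [List.length_take, List.length_drop]
          have := hrowlen j hj'
          omega)
        intro k hk
        rw [List.getElem_take, List.getElem_drop]
        have h1 : (rc.getD j []).getD (k + 1) 0
            = (rc.getD j [])[k + 1]'(by have := hrowlen j hj'; omega) :=
          List.getD_eq_getElem _ _ _
        rw [h1]
        congr 1
        all_goals omega
      exact i1.trans i2.symm
    exact a1.trans a2.symm

theorem fold_enc' (m : Nat) (hm : 2 ≤ m) (ops : List String) (g : List (List Int))
    (hg : 1 ≤ g.length) (hcase : 2 ≤ g.length ∨ "Rotate" ∉ ops) (hr : Rect m g) :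
    (ops.foldl (fun s op => if op = "Rotate" then rotStepA s
        else (pyRotL s.1, pyRotR s.2.1, pyRotR s.2.2)) (encS g)
      = encS (ops.foldl (fun (grid : List (List Int)) (op : String) => if op = "Rotate" then
            (PySem.List.pyRange 0 (grid.length : Int) 1).map (fun i =>
              (PySem.List.pyRange 0 (m : Int) 1).map (fun j =>
                rotCell grid (grid.length : Int) (m : Int) i j))
          else (PySem.List.pyRange 0 (grid.length : Int) 1).map (fun i =>
            (PySem.List.pyRange 0 (m : Int) 1).map (fun j =>
              PySem.List.pyGetD (PySem.List.pyGetD grid (i - 1) []) j 0))) g))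
    ∧ (ops.foldl (fun (grid : List (List Int)) (op : String) => if op = "Rotate" then
            (PySem.List.pyRange 0 (grid.length : Int) 1).map (fun i =>
              (PySem.List.pyRange 0 (m : Int) 1).map (fun j =>
                rotCell grid (grid.length : Int) (m : Int) i j))
          else (PySem.List.pyRange 0 (grid.length : Int) 1).map (fun i =>
            (PySem.List.pyRange 0 (m : Int) 1).map (fun j =>
              PySem.List.pyGetD (PySem.List.pyGetD grid (i - 1) []) j 0))) g).length = g.length
    ∧ Rect m (ops.foldl (fun (grid : List (List Int)) (op : String) => if op = "Rotate" then
            (PySem.List.pyRange 0 (grid.length : Int) 1).map (fun i =>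
              (PySem.List.pyRange 0 (m : Int) 1).map (fun j =>
                rotCell grid (grid.length : Int) (m : Int) i j))
          else (PySem.List.pyRange 0 (grid.length : Int) 1).map (fun i =>
            (PySem.List.pyRange 0 (m : Int) 1).map (fun j =>
              PySem.List.pyGetD (PySem.List.pyGetD grid (i - 1) []) j 0))) g) := by
  have hb : (fun (grid : List (List Int)) (op : String) => if op = "Rotate" then
            (PySem.List.pyRange 0 (grid.length : Int) 1).map (fun i =>
              (PySem.List.pyRange 0 (m : Int) 1).map (fun j =>
                rotCell grid (grid.length : Int) (m : Int) i j))
          else (PySem.List.pyRange 0 (grid.length : Int) 1).map (fun i =>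
            (PySem.List.pyRange 0 (m : Int) 1).map (fun j =>
              PySem.List.pyGetD (PySem.List.pyGetD grid (i - 1) []) j 0)))
      = (fun (grid : List (List Int)) (op : String) => if op = "Rotate" then rotBfun grid m
          else shiftBfun grid m) := rfl
  rw [hb]
  exact fold_enc m hm ops g hg hcase hr

theorem solution_eq_alt (rc : List (List Int)) (operations : List String)
    (hn1 : 1 ≤ rc.length) (hcase : 2 ≤ rc.length ∨ "Rotate" ∉ operations)
    (hm2 : 2 ≤ (rc.headD []).length)
    (hrows : ∀ row ∈ rc, (rc.headD []).length ≤ row.length) :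
    solution rc operations = solution_alt rc operations := by
  have hg0len : (rc.map (fun row =>
      PySem.List.slice row none (some ((rc.headD []).length : Int)))).length = rc.length := by simp
  have hrect0 : Rect (rc.headD []).length
      (rc.map (fun row => PySem.List.slice row none (some ((rc.headD []).length : Int)))) := by
    intro r hrm
    simp only [List.mem_map] at hrm
    obtain ⟨row, hrow, rfl⟩ := hrm
    rw [slice_take, List.length_take, Nat.min_eq_left (hrows row hrow)]
  obtain ⟨e1, e2, e3⟩ := fold_enc' (rc.headD []).length hm2 operations
    (rc.map (fun row => PySem.List.slice row none (some ((rc.headD []).length : Int))))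
    (by rw [hg0len]; omega) (by rw [hg0len]; exact hcase) hrect0
  simp only [solution, solution_alt]
  rw [init_enc rc (rc.headD []).length hm2 hrows (by omega), e1]
  simp only [encS]
  rw [decode_fold _ _ _ _ _ (by rw [length_pyRange_zero]; simp only [colL, List.length_map]; rw [e2, hg0len])
    (by rw [length_pyRange_zero]; simp only [midOf, List.length_map]; rw [e2, hg0len])
    (by rw [length_pyRange_zero]; simp only [colR, List.length_map]; rw [e2, hg0len])]
  simp only [List.nil_append]
  exact zip3Rows_enc (rc.headD []).length hm2 _ e3

-- ===== VERDICT (by name: the statement is the Claim_ definition above) =====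
theorem solution_spec : Claim_equal_solution := by
  intro rc operations hdom hpre
  obtain ⟨hn1, hm2, hrows, hops, hcase⟩ := hpre
  show solution rc operations = solution_alt rc operations
  exact solution_eq_alt rc operations hn1 hcase hm2 hrows
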